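-- pv_equiv track=rewrite | github.com/tompudding/advent_of_code | 2023/puzzle_1.py | parse_digits
-- ===== SOURCE A (Python) =====
-- numbers = {
--     "1": 1,
--     "2": 2,
--     "3": 3,
--     "4": 4,
--     "5": 5,
--     "6": 6,
--     "7": 7,
--     "8": 8,
--     "9": 9,
--     "one": 1,
--     "two": 2,
--     "three": 3,
--     "four": 4,
--     "five": 5,
--     "six": 6,
--     "seven": 7,
--     "eight": 8,
--     "nine": 9,
-- }
--
-- def parse_digits(line):
--     out = []
--     pos = 0
--     while pos < len(line):
--         for num in numbers:
--             if line[pos:].startswith(num):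
--                 out.append(numbers[num])
--                 # They can overlap!
--                 pos += 1
--                 break
--         else:
--             pos += 1
--
--     return out
-- ===== SOURCE B (Python) =====
-- numbers = {
--     "1": 1,
--     "2": 2,
--     "3": 3,
--     "4": 4,
--     "5": 5,
--     "6": 6,
--     "7": 7,
--     "8": 8,
--     "9": 9,
--     "one": 1,
--     "two": 2,
--     "three": 3,
--     "four": 4,
--     "five": 5,
--     "six": 6,
--     "seven": 7,
--     "eight": 8,
--     "nine": 9,
-- }
--
-- def parse_digits(line):
--     hits = []
--     for num, value in numbers.items():
--         idx = line.find(num)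
--         while idx != -1:
--             hits.append((idx, value))
--             # overlapping matches: resume one past this hit
--             idx = line.find(num, idx + 1)
--     hits.sort(key=lambda hit: hit[0])
--     return [value for _, value in hits]
-- ===== Notes on version B (the rewrite author's own statement) =====
-- stated objective: faster
-- what changed: A scans position-major, slicing line[pos:] and testing all 18 keys with startswith at every position; B is pattern-major: for each key it collects all (possibly overlapping) match indices with repeated str.find(num, idx+1), then sorts the hits by index once and returns their values -- valid because no key of the dict is a prefix of another, so no two keys ever match at the same index.
import Mathlib
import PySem

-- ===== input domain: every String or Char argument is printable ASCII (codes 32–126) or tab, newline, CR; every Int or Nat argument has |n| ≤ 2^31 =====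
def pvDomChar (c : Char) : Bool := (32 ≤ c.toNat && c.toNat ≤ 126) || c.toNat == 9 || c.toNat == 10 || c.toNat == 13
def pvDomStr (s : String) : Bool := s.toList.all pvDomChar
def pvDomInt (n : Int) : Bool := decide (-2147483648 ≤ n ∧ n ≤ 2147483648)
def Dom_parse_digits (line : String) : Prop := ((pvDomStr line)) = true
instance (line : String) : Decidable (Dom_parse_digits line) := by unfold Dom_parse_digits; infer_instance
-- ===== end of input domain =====

-- B replaces A's position-major scan (slice + startswith per key at every position) with a
-- pattern-major repeated-find per key followed by one sort of the hits by index (objective: faster).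

-- ===== PORT A =====
-- the module-level 'numbers' dict, in insertion order (shared by both ports, as in Python)
def numbers : List (List Char × Int) :=
  [("1".toList, 1), ("2".toList, 2), ("3".toList, 3), ("4".toList, 4), ("5".toList, 5),
   ("6".toList, 6), ("7".toList, 7), ("8".toList, 8), ("9".toList, 9),
   ("one".toList, 1), ("two".toList, 2), ("three".toList, 3), ("four".toList, 4),
   ("five".toList, 5), ("six".toList, 6), ("seven".toList, 7), ("eight".toList, 8),
   ("nine".toList, 9)]

-- A's inner 'for num in numbers: if line[pos:].startswith(num): … break / else: …'
def aScanKeys : List (List Char × Int) → List Char → Option Int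
  | [], _ => none
  | (k, v) :: rest, s => if PySem.Chars.startswith s k then some v else aScanKeys rest s

-- A's 'while pos < len(line)' loop; pos advances by exactly 1 in both branches, so it is the
-- structural recursion over the suffix line[pos:]
def aLoop : List Char → List Int
  | [] => []
  | c :: rest =>
    match aScanKeys numbers (c :: rest) with
    | some v => v :: aLoop rest
    | none => aLoop rest

def parse_digits (line : String) : List Int := aLoop line.toList

-- ===== PORT B =====
-- B's inner 'while idx != -1: hits.append((idx, value)); idx = line.find(num, idx + 1)' starting
-- from a given start index ('if' guard only makes the recursion total; findFrom = -1 there anyway)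
def bCollect (cs sub : List Char) (v : Int) (start : Nat) : List (Nat × Int) :=
  if hs : start ≤ cs.length then
    let r := PySem.Chars.findFrom cs sub (start : Int) none
    if hr : r = -1 then []
    else (r.toNat, v) :: bCollect cs sub v (r.toNat + 1)
  else []
termination_by cs.length + 1 - start
decreasing_by
  have h := (PySem.Chars.findFrom_natCast_spec cs sub start hs hr).1
  omega

def parse_digits_alt (line : String) : List Int :=
  let cs := line.toList
  let hits := numbers.flatMap (fun kv => bCollect cs kv.1 kv.2 0)
  (PySem.List.sorted hits (fun hit => hit.1) false).map (fun hit => hit.2)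

-- ===== PRECONDITION & SPEC =====
def Spec_parse_digits (line : String) (out : List Int) : Prop := out = parse_digits_alt line
instance (line : String) (out : List Int) : Decidable (Spec_parse_digits line out) := by unfold Spec_parse_digits; infer_instance

-- ===== CLAIM (what is proved, stated in full; the proofs are below) =====
def Claim_equal_parse_digits : Prop := ∀ (line : String), Dom_parse_digits line → Spec_parse_digits line (parse_digits line)

-- ===== LEMMAS AND PROOFS =====
-- proof-side characterisation: the first key of 'numbers' matching at position i, as A scans it
def matchAt (cs : List Char) (i : Nat) : Option Int := aScanKeys numbers (cs.drop i)

-- the (index, value) pairs in increasing index order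
def pairsList (cs : List Char) : List (Nat × Int) :=
  (List.range cs.length).filterMap (fun i => (matchAt cs i).map (fun v => (i, v)))

lemma numbers_prefix_eq : ∀ p ∈ numbers, ∀ q ∈ numbers, p.1 <+: q.1 → p = q := by decide

lemma numbers_key_ne_nil : ∀ p ∈ numbers, p.1 ≠ [] := by decide

lemma numbers_pairwise_ne : numbers.Pairwise (fun p q => p ≠ q) := by decide

-- no two distinct keys match at the same position
lemma uniq {s : List Char} {p q : List Char × Int} (hp : p ∈ numbers) (hq : q ∈ numbers)
    (h1 : p.1 <+: s) (h2 : q.1 <+: s) : p = q := by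
  rcases List.prefix_or_prefix_of_prefix h1 h2 with h | h
  · exact numbers_prefix_eq p hp q hq h
  · exact (numbers_prefix_eq q hq p hp h).symm

lemma prefix_drop_lt {k cs : List Char} {j : Nat} (hk : k ≠ []) (h : k <+: cs.drop j) :
    j < cs.length := by
  have h1 := h.length_le
  have h2 : 0 < k.length := List.length_pos_iff.mpr hk
  rw [List.length_drop] at h1
  omega

lemma scan_sound {L : List (List Char × Int)} {s : List Char} {v : Int}
    (h : aScanKeys L s = some v) : ∃ k, (k, v) ∈ L ∧ k <+: s := by
  induction L with
  | nil => simp [aScanKeys] at h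
  | cons p rest ih =>
    obtain ⟨k0, v0⟩ := p
    rw [aScanKeys] at h
    split at h
    · cases h
      exact ⟨k0, by simp, (PySem.Chars.startswith_iff _ _).mp ‹_›⟩
    · obtain ⟨k, hk, hpre⟩ := ih h
      exact ⟨k, by simp [hk], hpre⟩

lemma scan_complete {s k : List Char} {v : Int} :
    ∀ (L : List (List Char × Int)),
      (∀ p ∈ L, ∀ q ∈ L, p.1 <+: s → q.1 <+: s → p = q) →
      (k, v) ∈ L → k <+: s → aScanKeys L s = some v := by
  intro L
  induction L with
  | nil => intro _ h; simp at h
  | cons p rest ih =>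
    intro hu hmem hpre
    obtain ⟨k0, v0⟩ := p
    rw [aScanKeys]
    by_cases hsw : PySem.Chars.startswith s k0 = true
    · rw [if_pos hsw]
      have h0 : (k0, v0) = (k, v) := by
        rcases List.mem_cons.mp hmem with h | h
        · exact h.symm
        · exact hu (k0, v0) (by simp) (k, v) (by simp [h])
            ((PySem.Chars.startswith_iff _ _).mp hsw) hpre
      simp [Prod.mk.injEq] at h0
      simp [h0.2]
    · rw [if_neg hsw]
      have hmem' : (k, v) ∈ rest := by
        rcases List.mem_cons.mp hmem with h | h
        · exfalso
          apply hsw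
          rw [PySem.Chars.startswith_iff]
          cases h; exact hpre
        · exact h
      exact ih (fun p hp q hq => hu p (by simp [hp]) q (by simp [hq])) hmem' hpre

lemma matchAt_iff {cs : List Char} {j : Nat} {v : Int} :
    matchAt cs j = some v ↔ ∃ k, (k, v) ∈ numbers ∧ k <+: cs.drop j := by
  constructor
  · exact scan_sound
  · rintro ⟨k, hmem, hpre⟩
    exact scan_complete numbers (fun p hp q hq => uniq hp hq) hmem hpre

lemma infix_drop_iff (cs sub : List Char) (start : Nat) :
    sub <:+: cs.drop start ↔ ∃ j, start ≤ j ∧ sub <+: cs.drop j := by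
  constructor
  · intro h
    obtain ⟨t, hpre, hsuf⟩ := List.infix_iff_prefix_suffix.mp h
    obtain ⟨u, hu⟩ := hsuf
    refine ⟨start + u.length, by omega, ?_⟩
    have ht : List.drop u.length (u ++ t) = t := List.drop_left
    rw [hu, List.drop_drop] at ht
    exact ht ▸ hpre
  · rintro ⟨j, hj, hpre⟩
    have hdj : cs.drop j = (cs.drop start).drop (j - start) := by
      rw [List.drop_drop]
      congr 1
      omega
    exact List.infix_iff_prefix_suffix.mpr ⟨cs.drop j, hpre, hdj ▸ List.drop_suffix _ _⟩

lemma mem_bCollect {cs sub : List Char} {v : Int} (hsub : sub ≠ []) (start : Nat)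
    (j : Nat) (w : Int) :
    (j, w) ∈ bCollect cs sub v start ↔ (w = v ∧ start ≤ j ∧ sub <+: cs.drop j) := by
  fun_induction bCollect cs sub v start with
  | case1 start hs r hr =>
    simp only [List.not_mem_nil, false_iff]
    rintro ⟨hw, hj, hpre⟩
    have hinf : sub <:+: cs.drop start := (infix_drop_iff cs sub start).mpr ⟨j, hj, hpre⟩
    exact ((PySem.Chars.findFrom_natCast_eq_neg_one_iff cs sub start hs).mp hr) hinf
  | case2 start hs r hr ih =>
    obtain ⟨h1, h2, h3⟩ := PySem.Chars.findFrom_natCast_spec cs sub start hs hr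
    have h1' : start ≤ r.toNat := by omega
    simp only [List.mem_cons, Prod.mk.injEq, ih]
    constructor
    · rintro (⟨hj, hw⟩ | ⟨hw, hj, hpre⟩)
      · exact ⟨hw, by omega, hj ▸ h2⟩
      · exact ⟨hw, by omega, hpre⟩
    · rintro ⟨hw, hj, hpre⟩
      by_cases hje : j = r.toNat
      · exact Or.inl ⟨hje, hw⟩
      · have hgt : r.toNat < j := by
          rcases Nat.lt_or_ge j r.toNat with hlt | hge
          · exact absurd hpre (h3 j hj hlt)
          · omega
        exact Or.inr ⟨hw, by omega, hpre⟩
  | case3 start hs =>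
    simp only [List.not_mem_nil, false_iff]
    rintro ⟨hw, hj, hpre⟩
    exact absurd (prefix_drop_lt hsub hpre) (by omega)

lemma pairwise_bCollect {cs sub : List Char} {v : Int} (hsub : sub ≠ []) (start : Nat) :
    (bCollect cs sub v start).Pairwise (fun p q => p.1 < q.1) := by
  fun_induction bCollect cs sub v start with
  | case1 start hs r hr => exact List.Pairwise.nil
  | case2 start hs r hr ih =>
    refine List.Pairwise.cons ?_ ih
    intro q hq
    have := (mem_bCollect hsub (r.toNat + 1) q.1 q.2).mp (by simpa using hq)
    omega
  | case3 start hs => exact List.Pairwise.nil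

-- the hit list B builds, before sorting
def hitsList (cs : List Char) : List (Nat × Int) :=
  numbers.flatMap (fun kv => bCollect cs kv.1 kv.2 0)

lemma mem_hitsList {cs : List Char} {j : Nat} {w : Int} :
    (j, w) ∈ hitsList cs ↔ matchAt cs j = some w := by
  rw [hitsList, List.mem_flatMap, matchAt_iff]
  constructor
  · rintro ⟨kv, hkv, hmem⟩
    obtain ⟨hw, -, hpre⟩ := (mem_bCollect (numbers_key_ne_nil kv hkv) 0 j w).mp hmem
    exact ⟨kv.1, by rw [hw]; exact ⟨by simpa using hkv, hpre⟩⟩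
  · rintro ⟨k, hmem, hpre⟩
    exact ⟨(k, w), hmem, (mem_bCollect (numbers_key_ne_nil (k, w) hmem) 0 j w).mpr
      ⟨rfl, Nat.zero_le _, hpre⟩⟩

lemma nodup_hitsList (cs : List Char) : (hitsList cs).Nodup := by
  rw [hitsList, List.nodup_flatMap]
  constructor
  · intro kv hkv
    exact ((pairwise_bCollect (numbers_key_ne_nil kv hkv) 0).imp
      (fun h => by intro e; rw [e] at h; exact lt_irrefl _ h))
  · refine numbers_pairwise_ne.imp_of_mem ?_
    intro p q hp hq hne
    rw [Function.onFun, List.disjoint_left]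
    rintro ⟨j, w⟩ hjp hjq
    obtain ⟨hw1, -, hpre1⟩ := (mem_bCollect (numbers_key_ne_nil p hp) 0 j w).mp hjp
    obtain ⟨hw2, -, hpre2⟩ := (mem_bCollect (numbers_key_ne_nil q hq) 0 j w).mp hjq
    exact hne (uniq hp hq hpre1 hpre2)

lemma matchAt_lt_length {cs : List Char} {j : Nat} {w : Int} (h : matchAt cs j = some w) :
    j < cs.length := by
  obtain ⟨k, hmem, hpre⟩ := matchAt_iff.mp h
  exact prefix_drop_lt (numbers_key_ne_nil (k, w) hmem) hpre

lemma mem_pairsList {cs : List Char} {j : Nat} {w : Int} :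
    (j, w) ∈ pairsList cs ↔ matchAt cs j = some w := by
  rw [pairsList, List.mem_filterMap]
  constructor
  · rintro ⟨i, hi, hmap⟩
    obtain ⟨v, hv, heq⟩ := Option.map_eq_some_iff.mp hmap
    obtain ⟨h1, h2⟩ := Prod.mk.injEq .. ▸ heq
    rw [← h1, ← h2]; exact hv
  · intro h
    exact ⟨j, List.mem_range.mpr (matchAt_lt_length h), by rw [h]; rfl⟩

lemma pairwise_pairsList (cs : List Char) :
    (pairsList cs).Pairwise (fun p q => p.1 < q.1) := by
  refine List.Pairwise.filterMap _ ?_ (List.pairwise_lt_range)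
  intro a a' hlt b hb b' hb'
  obtain ⟨v, -, heq⟩ := Option.map_eq_some_iff.mp hb
  obtain ⟨v', -, heq'⟩ := Option.map_eq_some_iff.mp hb'
  rw [← heq, ← heq']
  exact hlt

lemma nodup_pairsList (cs : List Char) : (pairsList cs).Nodup :=
  (pairwise_pairsList cs).imp (fun h => by intro e; rw [e] at h; exact lt_irrefl _ h)

lemma perm_pairs_hits (cs : List Char) : (pairsList cs).Perm (hitsList cs) := by
  refine (List.perm_ext_iff_of_nodup (nodup_pairsList cs) (nodup_hitsList cs)).mpr ?_
  rintro ⟨j, w⟩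
  rw [mem_pairsList, mem_hitsList]

lemma sorted_hits_eq (cs : List Char) :
    PySem.List.sorted (hitsList cs) (fun hit => hit.1) false = pairsList cs :=
  PySem.List.sorted_eq_of_perm_of_pairwise_lt (hitsList cs) (pairsList cs) (fun hit => hit.1) (perm_pairs_hits cs) (pairwise_pairsList cs)

lemma aLoop_eq (cs : List Char) :
    aLoop cs = (List.range cs.length).filterMap (fun i => matchAt cs i) := by
  induction cs with
  | nil => simp [aLoop]
  | cons c rest ih =>
    rw [aLoop, List.length_cons, List.range_succ_eq_map, List.filterMap_cons,
      List.filterMap_map]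
    have hshift : ((fun i => matchAt (c :: rest) i) ∘ Nat.succ) = fun i => matchAt rest i := by
      funext i
      simp [matchAt, List.drop_succ_cons]
    rw [hshift, ← ih]
    have h0 : matchAt (c :: rest) 0 = aScanKeys numbers (c :: rest) := rfl
    cases hm : aScanKeys numbers (c :: rest) <;> simp [h0, hm]

lemma pairs_map_snd (cs : List Char) :
    (pairsList cs).map (fun hit => hit.2) = (List.range cs.length).filterMap (fun i => matchAt cs i) := by
  rw [pairsList, List.map_filterMap]
  congr 1
  funext i
  cases matchAt cs i <;> rfl

-- ===== VERDICT (by name: the statement is the Claim_ definition above) =====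
theorem parse_digits_spec : Claim_equal_parse_digits := by
  intro line _
  unfold Spec_parse_digits parse_digits parse_digits_alt
  have h := sorted_hits_eq line.toList
  rw [hitsList] at h
  simp only [aLoop_eq, h, pairs_map_snd]
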